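-- pv_equiv track=rewrite | github.com/djplesh/code | misc/get_info.py | ctr_rollover
-- ===== SOURCE A (Python) =====
-- def ctr_rollover(ctr):
--     """adjust ctr values for roll over at 2^32 tics"""
--
--     v = 0
--     ctr_full = []
--     ctr_full.append(ctr[0])
--     for k in range(1, len(ctr)):
--         if ctr[k] < ctr[k - 1]:
--             v = v + 1
--         ctr_full.append(ctr[k] + (2**32)*v)
--     return ctr_full
-- ===== SOURCE B (Python) =====
-- def ctr_rollover(ctr):
--     """adjust ctr values for roll over at 2^32 tics
--     (segment the trace into maximal rollover-free runs, then offset each run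
--     by its run index times 2^32)"""
--     runs = [[ctr[0]]]
--     for prev, cur in zip(ctr, ctr[1:]):
--         if cur < prev:
--             runs.append([cur])
--         else:
--             runs[-1].append(cur)
--     out = []
--     for i, run in enumerate(runs):
--         off = (2 ** 32) * i
--         out.extend(x + off for x in run)
--     return out
-- ===== Notes on version B (the rewrite author's own statement) =====
-- stated objective: alternative
-- what changed: B replaces A's single indexed loop threading a rollover counter through the output with a run-decomposition: it first groups the trace into a list of maximal rollover-free runs, then flattens that list of runs adding run_index * 2^32 to every element of each run.
import Mathlib
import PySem

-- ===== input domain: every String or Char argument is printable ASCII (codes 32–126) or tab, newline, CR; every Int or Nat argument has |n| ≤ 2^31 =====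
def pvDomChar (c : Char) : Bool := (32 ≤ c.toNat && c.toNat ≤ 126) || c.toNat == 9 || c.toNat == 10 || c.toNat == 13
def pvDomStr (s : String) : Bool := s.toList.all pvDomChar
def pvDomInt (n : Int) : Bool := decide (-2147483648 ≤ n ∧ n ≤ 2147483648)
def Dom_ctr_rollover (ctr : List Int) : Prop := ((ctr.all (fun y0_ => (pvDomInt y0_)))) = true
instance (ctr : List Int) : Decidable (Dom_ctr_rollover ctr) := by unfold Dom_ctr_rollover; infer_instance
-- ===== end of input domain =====

-- B recasts A's accumulator loop as a run decomposition: group the trace into maximal rollover-free runs, then flatten, offsetting each run by its index times 2^32; same results, same cost.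

-- ===== PORT A =====
def ctr_rollover (ctr : List Int) : List Int :=
  -- v = 0; ctr_full = [ctr[0]]; for k in range(1, len(ctr)): …
  let st := (PySem.List.pyRange 1 (ctr.length : Int) 1).foldl
    (fun (st : Int × List Int) k =>
      let v := if PySem.List.pyGetD ctr k 0 < PySem.List.pyGetD ctr (k - 1) 0 then st.1 + 1 else st.1
      (v, st.2 ++ [PySem.List.pyGetD ctr k 0 + 2 ^ 32 * v]))
    (0, [PySem.List.pyGetD ctr 0 0])
  st.2

-- ===== PORT B =====
def ctr_rollover_alt (ctr : List Int) : List Int :=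
  -- runs = [[ctr[0]]]; for prev, cur in zip(ctr, ctr[1:]): append a new run or extend the last
  let tail := PySem.List.slice ctr (some 1) none
  let runs := (ctr.zip tail).foldl
    (fun (runs : List (List Int)) pc =>
      if pc.2 < pc.1 then runs ++ [[pc.2]]
      else runs.dropLast ++ [runs.getLastD [] ++ [pc.2]])
    [[PySem.List.pyGetD ctr 0 0]]
  -- out = []; for i, run in enumerate(runs): out.extend(x + 2**32*i for x in run)
  (PySem.List.enumerate runs).foldl
    (fun out ir => out ++ ir.2.map (fun x => x + 2 ^ 32 * ir.1)) []

-- ===== PRECONDITION & SPEC =====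
-- Pre_ excludes only the empty list, on which both A and B raise IndexError on the first-element access.
def Pre_ctr_rollover (ctr : List Int) : Prop := ctr ≠ []
instance (ctr : List Int) : Decidable (Pre_ctr_rollover ctr) := by unfold Pre_ctr_rollover; infer_instance
def pvWitness_ctr_rollover : List Int := [5, 3]

def Spec_ctr_rollover (ctr : List Int) (out : List Int) : Prop := out = ctr_rollover_alt ctr
instance (ctr : List Int) (out : List Int) : Decidable (Spec_ctr_rollover ctr out) := by unfold Spec_ctr_rollover; infer_instance

-- ===== CLAIM (what is proved, stated in full; the proofs are below) =====
def Claim_equal_ctr_rollover : Prop := ∀ (ctr : List Int), Dom_ctr_rollover ctr → Pre_ctr_rollover ctr → Spec_ctr_rollover ctr (ctr_rollover ctr)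

-- ===== LEMMAS AND PROOFS =====

/-- Reference recursion: unwrapped values of `rest` given the previous raw value and rollover count. -/
def auxR (prev v : Int) : List Int → List Int
  | [] => []
  | x :: xs =>
    let v' := if x < prev then v + 1 else v
    (x + 2 ^ 32 * v') :: auxR x v' xs

/-- Flatten a list of runs, offsetting each run by 2^32 times its index (starting at `s`). -/
def flatOff (s : Int) : List (List Int) → List Int
  | [] => []
  | r :: rs => r.map (fun x => x + 2 ^ 32 * s) ++ flatOff (s + 1) rs

lemma flatOff_append (A B : List (List Int)) : ∀ s,
    flatOff s (A ++ B) = flatOff s A ++ flatOff (s + A.length) B := by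
  induction A with
  | nil => intro s; simp [flatOff]
  | cons r rs ih =>
    intro s
    simp only [List.cons_append, flatOff, ih (s + 1), List.length_cons, List.append_assoc]
    congr 2
    push_cast; ring

lemma enumFold (runs : List (List Int)) : ∀ (s : Int) (acc : List Int),
    (PySem.List.enumerate runs s).foldl
      (fun out ir => out ++ ir.2.map (fun x => x + 2 ^ 32 * ir.1)) acc
    = acc ++ flatOff s runs := by
  induction runs with
  | nil => intro s acc; simp [PySem.List.enumerate_nil, flatOff]
  | cons r rs ih =>
    intro s acc
    rw [PySem.List.enumerate_cons]
    simp only [List.foldl_cons, ih (s + 1), flatOff, List.append_assoc]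

/-- Invariant of B's run-building fold: flattening the final runs equals flattening the
    finished prefix runs, the current run with its offset, and the reference unwrapping. -/
lemma runsFold (rest : List Int) : ∀ (prev : Int) (Rpre : List (List Int)) (L : List Int) (s : Int),
    flatOff s (((prev :: rest).zip rest).foldl
      (fun (runs : List (List Int)) pc =>
        if pc.2 < pc.1 then runs ++ [[pc.2]]
        else runs.dropLast ++ [runs.getLastD [] ++ [pc.2]])
      (Rpre ++ [L]))
    = flatOff s Rpre ++ L.map (fun x => x + 2 ^ 32 * (s + Rpre.length))
        ++ auxR prev (s + Rpre.length) rest := by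
  induction rest with
  | nil =>
    intro prev Rpre L s
    simp [flatOff_append, flatOff, auxR]
  | cons x xs ih =>
    intro prev Rpre L s
    simp only [List.zip_cons_cons, List.foldl_cons]
    by_cases hx : x < prev
    · rw [if_pos hx]
      have : Rpre ++ [L] ++ [[x]] = (Rpre ++ [L]) ++ [[x]] := rfl
      rw [this, ih x (Rpre ++ [L]) [x] s]
      simp only [flatOff_append, flatOff, auxR, hx, if_pos, List.length_append,
        List.length_singleton, List.map_cons, List.map_nil, List.append_assoc, List.append_nil]
      have hc : (s + ((Rpre.length + 1 : Nat) : Int)) = s + Rpre.length + 1 := by push_cast; ring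
      rw [hc]
      simp
    · rw [if_neg hx]
      have hd : (Rpre ++ [L]).dropLast = Rpre := by simp
      have hg : (Rpre ++ [L]).getLastD [] = L := by
        rw [List.getLastD_eq_getLast?, List.getLast?_concat]; rfl
      rw [hd, hg, ih x Rpre (L ++ [x]) s]
      simp only [auxR, hx, List.map_append, List.map_cons, List.map_nil,
        List.append_assoc, ite_false]
      simp

lemma alt_cons (c : Int) (rest : List Int) :
    ctr_rollover_alt (c :: rest) = c :: auxR c 0 rest := by
  unfold ctr_rollover_alt
  simp only [PySem.List.slice_from_one, List.tail_cons]
  rw [enumFold]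
  have h0 : ([] : List (List Int)) ++ [[PySem.List.pyGetD (c :: rest) 0 0]]
      = [[PySem.List.pyGetD (c :: rest) 0 0]] := rfl
  rw [← h0, runsFold rest c [] [PySem.List.pyGetD (c :: rest) 0 0] 0]
  simp [flatOff, PySem.List.pyGetD_zero_cons]

def step_A (ctr : List Int) (st : Int × List Int) (k : Int) : Int × List Int :=
  let v := if PySem.List.pyGetD ctr k 0 < PySem.List.pyGetD ctr (k - 1) 0 then st.1 + 1 else st.1
  (v, st.2 ++ [PySem.List.pyGetD ctr k 0 + 2 ^ 32 * v])

lemma aFold (rest : List Int) : ∀ (pre : List Int) (prev v : Int) (acc : List Int),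
    ((PySem.List.pyRange ((pre.length : Int) + 1) (((pre ++ prev :: rest).length : Int)) 1).foldl
      (fun (st : Int × List Int) k =>
        let v := if PySem.List.pyGetD (pre ++ prev :: rest) k 0 <
                    PySem.List.pyGetD (pre ++ prev :: rest) (k - 1) 0 then st.1 + 1 else st.1
        (v, st.2 ++ [PySem.List.pyGetD (pre ++ prev :: rest) k 0 + 2 ^ 32 * v])) (v, acc)).2
    = acc ++ auxR prev v rest := by
  induction rest with
  | nil =>
    intro pre prev v acc
    rw [PySem.List.pyRange_one_eq_nil (by simp)]
    simp [auxR]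
  | cons x xs ih =>
    intro pre prev v acc
    rw [PySem.List.pyRange_one_cons (by simp)]
    simp only [List.foldl_cons]
    have h1 : PySem.List.pyGetD (pre ++ prev :: x :: xs) ((pre.length : Int) + 1) 0 = x := by
      have e : ((pre.length : Int) + 1) = ((pre.length + 1 : Nat) : Int) := by push_cast; ring
      rw [e, PySem.List.pyGetD_natCast, List.getD_eq_getElem?_getD]
      simp
    have h2 : PySem.List.pyGetD (pre ++ prev :: x :: xs) ((pre.length : Int) + 1 - 1) 0 = prev := by
      have e : ((pre.length : Int) + 1 - 1) = ((pre.length : Nat) : Int) := by norm_num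
      rw [e, PySem.List.pyGetD_natCast, List.getD_eq_getElem?_getD]
      simp
    rw [h1, h2]
    set v' := if x < prev then v + 1 else v with hv'
    have hre : pre ++ prev :: x :: xs = (pre ++ [prev]) ++ x :: xs := by simp
    have hlen : (pre.length : Int) + 1 + 1 = (((pre ++ [prev]).length : Int) + 1) := by simp
    rw [show ((pre.length : Int) + 1 + 1) = (((pre ++ [prev]).length : Int) + 1) from hlen]
    rw [hre]
    rw [ih (pre ++ [prev]) x v' (acc ++ [x + 2 ^ 32 * v'])]
    simp [auxR, hv']

lemma a_cons (c : Int) (rest : List Int) :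
    ctr_rollover (c :: rest) = c :: auxR c 0 rest := by
  unfold ctr_rollover
  have h := aFold rest [] c 0 [c]
  simp only [List.nil_append, List.length_nil, Nat.cast_zero, zero_add] at h
  simpa [PySem.List.pyGetD_zero_cons] using h

-- ===== VERDICT (by name: the statement is the Claim_ definition above) =====
theorem ctr_rollover_spec : Claim_equal_ctr_rollover := by
  intro ctr _ hpre
  unfold Spec_ctr_rollover
  match ctr with
  | [] => exact absurd rfl hpre
  | c :: rest => rw [a_cons, alt_cons]
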